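-- pv_equiv track=rewrite | github.com/AleksKovachev/Playground | 01. Password Manager/password_manager/data_management/__init__.py | update_list
-- ===== SOURCE A (Python) =====
-- def update_list(lst: list, sample: str):
--     """Orders a given list by relevancy and alphabetical order
--
--     Args:
--         lst (list): the list to be ordered
--         sample (str): results starting with this string will be shown first
--
--     Returns:
--         list: the ordered version of the input list
--     """
--
--     lst.sort()
--     temp_lst_first = []
--     temp_lst_rest = []
--     for item in lst:
--         if item.lower().startswith(sample.lower()):
--             temp_lst_first.append(item)
--         else:
--             temp_lst_rest.append(item)
--     lst = temp_lst_first + temp_lst_rest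
--
--     return lst
-- ===== SOURCE B (Python) =====
-- def update_list(lst: list, sample: str):
--     """Orders a given list by relevancy and alphabetical order."""
--     lst.sort()  # keep A's in-place sort of the caller's list
--     pref = sample.lower()
--     # stable key-sort: matching items first, alphabetical within each group
--     return sorted(lst, key=lambda x: not x.lower().startswith(pref))
-- ===== Notes on version B (the rewrite author's own statement) =====
-- stated objective: simpler
-- what changed: Replaces the two-accumulator partition loop plus concatenation with a single stable boolean-key sort (sorted(lst, key=lambda x: not x.lower().startswith(sample.lower()))) over the alphabetically sorted list; the interpreter-level partition loop becomes one C-implemented sorted() call with the prefix lowered once.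
import Mathlib
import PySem

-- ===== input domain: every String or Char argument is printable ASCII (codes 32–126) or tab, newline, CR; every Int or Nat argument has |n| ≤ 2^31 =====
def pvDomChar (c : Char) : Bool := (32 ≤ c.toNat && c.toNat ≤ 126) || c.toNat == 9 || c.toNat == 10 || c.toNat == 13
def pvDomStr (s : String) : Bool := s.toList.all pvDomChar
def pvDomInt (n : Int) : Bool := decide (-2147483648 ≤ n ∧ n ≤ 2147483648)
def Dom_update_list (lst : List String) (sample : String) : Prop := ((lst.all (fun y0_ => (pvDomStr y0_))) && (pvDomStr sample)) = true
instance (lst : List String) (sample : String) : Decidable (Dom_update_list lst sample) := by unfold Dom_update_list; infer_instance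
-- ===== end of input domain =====

-- B replaces A's two-accumulator partition loop with one stable boolean-key sort (simpler);
-- both versions sort the caller's list in place first, the proved equivalence is about the return value.

-- ===== PORT A =====
def update_list (lst : List String) (sample : String) : List String :=
  let lst₁ := PySem.List.sorted lst (fun x => x)            -- lst.sort()
  let pr := lst₁.foldl (fun acc item =>
      if PySem.Str.startswith (PySem.Str.lower item) (PySem.Str.lower sample)
      then (acc.1 ++ [item], acc.2)                          -- temp_lst_first.append(item)
      else (acc.1, acc.2 ++ [item]))                         -- temp_lst_rest.append(item)
    (([] : List String), ([] : List String))
  pr.1 ++ pr.2                                               -- temp_lst_first + temp_lst_rest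

-- ===== PORT B =====
def update_list_alt (lst : List String) (sample : String) : List String :=
  let lst₁ := PySem.List.sorted lst (fun x => x)            -- lst.sort()
  let pref := PySem.Str.lower sample
  PySem.List.sorted lst₁ (fun x => !(PySem.Str.startswith (PySem.Str.lower x) pref))

-- ===== PRECONDITION & SPEC =====
def Spec_update_list (lst : List String) (sample : String) (out : List String) : Prop := out = update_list_alt lst sample
instance (lst : List String) (sample : String) (out : List String) : Decidable (Spec_update_list lst sample out) := by unfold Spec_update_list; infer_instance

-- ===== CLAIM (what is proved, stated in full; the proofs are below) =====
def Claim_equal_update_list : Prop := ∀ (lst : List String) (sample : String), Dom_update_list lst sample → Spec_update_list lst sample (update_list lst sample)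

-- ===== LEMMAS AND PROOFS =====

-- inserting past a prefix none of whose elements x goes before
theorem pv_insertBy_append {α : Type} (before : α → α → Bool) (x : α) (A B : List α)
    (h : ∀ a ∈ A, before x a = false) :
    PySem.List.insertBy before x (A ++ B) = A ++ PySem.List.insertBy before x B := by
  induction A with
  | nil => simp
  | cons a A ih =>
    have ha : before x a = false := h a (by simp)
    simp only [List.cons_append, PySem.List.insertBy, ha]
    simpa using ih (fun a ha' => h a (by simp [ha']))

-- a stable sort by a Bool key partitions: false-key items first, each group in original order
theorem pv_foldl_insertBy_bool {α : Type} (k : α → Bool) (xs A B : List α)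
    (hA : ∀ a ∈ A, k a = false) (hB : ∀ b ∈ B, k b = true) :
    xs.foldl (fun acc x => PySem.List.insertBy (fun a b => decide (k a < k b)) x acc) (A ++ B)
      = (A ++ xs.filter (fun x => !k x)) ++ (B ++ xs.filter k) := by
  induction xs generalizing A B with
  | nil => simp
  | cons x xs ih =>
    simp only [List.foldl_cons]
    by_cases hx : k x = true
    · rw [PySem.List.insertBy_of_forall_not_before _ _ _ (fun y _ => by simp [hx]),
          List.append_assoc, ih A (B ++ [x]) hA (by intro b hb; rcases List.mem_append.1 hb with h | h
                                                    · exact hB b h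
                                                    · simp_all)]
      simp [hx, List.append_assoc]
    · have hx' : k x = false := by simpa using hx
      rw [pv_insertBy_append _ x A B (fun a ha => by simp [hA a ha, hx'])]
      have hins : PySem.List.insertBy (fun a b => decide (k a < k b)) x B = x :: B := by
        cases B with
        | nil => simp [PySem.List.insertBy]
        | cons b B => simp [PySem.List.insertBy, hB b (by simp), hx']
      rw [hins, show A ++ x :: B = (A ++ [x]) ++ B by simp,
          ih (A ++ [x]) B (by intro a ha; rcases List.mem_append.1 ha with h | h
                              · exact hA a h
                              · simp_all) hB]
      simp [hx', List.append_assoc]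

theorem pv_sorted_bool {α : Type} (xs : List α) (k : α → Bool) :
    PySem.List.sorted xs k = xs.filter (fun x => !k x) ++ xs.filter k := by
  rw [PySem.List.sorted_eq_foldl_insertBy]
  simpa using pv_foldl_insertBy_bool k xs [] [] (by simp) (by simp)

-- A's loop builds exactly the two filters
theorem pv_foldl_partition (p : String → Bool) (xs : List String) (f r : List String) :
    xs.foldl (fun acc item => if p item then (acc.1 ++ [item], acc.2) else (acc.1, acc.2 ++ [item])) (f, r)
      = (f ++ xs.filter p, r ++ xs.filter (fun x => !p x)) := by
  induction xs generalizing f r with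
  | nil => simp
  | cons x xs ih =>
    by_cases hx : p x = true <;>
      simp [List.foldl_cons, hx, ih, List.append_assoc]

-- ===== VERDICT (by name: the statement is the Claim_ definition above) =====
theorem update_list_spec : Claim_equal_update_list := by
  intro lst sample _
  show update_list lst sample = update_list_alt lst sample
  simp only [update_list, update_list_alt, pv_foldl_partition, pv_sorted_bool]
  simp
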